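-- pv_equiv track=rewrite | github.com/tbrennem-source/sf-permits-mcp | web/owner_mode.py | _uses_equivalent
-- ===== SOURCE A (Python) =====
-- _USE_EQUIVALENTS = [
--     # Sets of terms that are semantically equivalent
--     {"1 family dwelling", "single family dwelling", "single family", "single family residential", "sfr", "one family dwelling"},
--     {"2 family dwelling", "two family dwelling", "two family residential", "duplex", "2 family"},
--     {"apartments", "multi-family", "multifamily"},
--     {"office", "offices"},
--     {"retail", "retail sales", "retail store"},
-- ]
--
-- def _uses_equivalent(use_a: str, use_b: str) -> bool:
--     """Check if two use descriptions are known equivalents."""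
--     a = use_a.lower().strip()
--     b = use_b.lower().strip()
--     if a == b:
--         return True
--     for equiv_set in _USE_EQUIVALENTS:
--         if a in equiv_set and b in equiv_set:
--             return True
--     return False
-- ===== SOURCE B (Python) =====
-- _USE_EQUIVALENTS = [
--     # Sets of terms that are semantically equivalent
--     {"1 family dwelling", "single family dwelling", "single family", "single family residential", "sfr", "one family dwelling"},
--     {"2 family dwelling", "two family dwelling", "two family residential", "duplex", "2 family"},
--     {"apartments", "multi-family", "multifamily"},
--     {"office", "offices"},
--     {"retail", "retail sales", "retail store"},
-- ]
--
-- # term -> index of its equivalence group, built once at import time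
-- _IDX = {term: i for i, group in enumerate(_USE_EQUIVALENTS) for term in group}
--
-- def _uses_equivalent(use_a: str, use_b: str) -> bool:
--     """Check if two use descriptions are known equivalents."""
--     a = use_a.lower().strip()
--     b = use_b.lower().strip()
--     if a == b:
--         return True
--     g = _IDX.get(a)
--     return g is not None and g == _IDX.get(b)
-- ===== Notes on version B (the rewrite author's own statement) =====
-- stated objective: idiomatic
-- what changed: B precomputes once a module-level dict mapping each term to its equivalence-group index, so each call does two dict lookups plus an index comparison instead of scanning all equivalence sets and testing membership of both strings in each.
import Mathlib
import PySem

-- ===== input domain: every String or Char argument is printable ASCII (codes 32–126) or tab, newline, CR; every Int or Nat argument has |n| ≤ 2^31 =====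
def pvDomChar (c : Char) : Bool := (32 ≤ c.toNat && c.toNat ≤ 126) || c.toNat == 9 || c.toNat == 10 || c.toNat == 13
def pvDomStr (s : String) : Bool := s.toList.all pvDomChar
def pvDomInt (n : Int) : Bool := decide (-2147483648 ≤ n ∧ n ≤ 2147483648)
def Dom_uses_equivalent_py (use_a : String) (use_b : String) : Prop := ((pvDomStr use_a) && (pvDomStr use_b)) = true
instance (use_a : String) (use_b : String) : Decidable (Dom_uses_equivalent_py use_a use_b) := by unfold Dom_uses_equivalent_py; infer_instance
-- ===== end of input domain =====

-- B replaces A's per-call scan over the equivalence sets by two lookups in a term→group-index dict precomputed once.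

-- ===== PORT A =====
-- `_USE_EQUIVALENTS`: the list of equivalence sets (only membership is consumed, so set element order is irrelevant)
def pvGroups : List (PySem.Set String) :=
  [ PySem.Set.ofList ["1 family dwelling", "single family dwelling", "single family", "single family residential", "sfr", "one family dwelling"],
    PySem.Set.ofList ["2 family dwelling", "two family dwelling", "two family residential", "duplex", "2 family"],
    PySem.Set.ofList ["apartments", "multi-family", "multifamily"],
    PySem.Set.ofList ["office", "offices"],
    PySem.Set.ofList ["retail", "retail sales", "retail store"] ]

-- the 'for equiv_set in _USE_EQUIVALENTS: if a in equiv_set and b in equiv_set: return True' loop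
def pvLoopA (a b : String) : List (PySem.Set String) → Bool
  | [] => false
  | s :: rest => if PySem.Set.contains s a && PySem.Set.contains s b then true else pvLoopA a b rest

def uses_equivalent_py (use_a : String) (use_b : String) : Bool :=
  let a := PySem.Str.strip (PySem.Str.lower use_a)
  let b := PySem.Str.strip (PySem.Str.lower use_b)
  if a = b then true
  else pvLoopA a b pvGroups

-- ===== PORT B =====
-- '{term: i for i, group in enumerate(_USE_EQUIVALENTS) for term in group}': the keys are distinct,
-- so Python's unspecified set-iteration order only affects the dict's insertion order, which .get()
-- never observes; the dict content is the same for any order.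
def pvPairs (n : Int) : List (PySem.Set String) → List (String × Int)
  | [] => []
  | g :: rest => (g.map fun t => (t, n)) ++ pvPairs (n + 1) rest

def pvIdx : PySem.Dict String Int := PySem.Dict.ofList (pvPairs 0 pvGroups)

def uses_equivalent_py_alt (use_a : String) (use_b : String) : Bool :=
  let a := PySem.Str.strip (PySem.Str.lower use_a)
  let b := PySem.Str.strip (PySem.Str.lower use_b)
  if a = b then true
  else
    match PySem.Dict.get? pvIdx a with          -- g = _IDX.get(a)
    | none => false                              -- g is not None and …
    | some g => PySem.Dict.get? pvIdx b == some g

-- ===== PRECONDITION & SPEC =====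
def Spec_uses_equivalent_py (use_a : String) (use_b : String) (out : Bool) : Prop := out = uses_equivalent_py_alt use_a use_b
instance (use_a : String) (use_b : String) (out : Bool) : Decidable (Spec_uses_equivalent_py use_a use_b out) := by unfold Spec_uses_equivalent_py; infer_instance

-- ===== CLAIM (what is proved, stated in full; the proofs are below) =====
def Claim_equal_uses_equivalent_py : Prop := ∀ (use_a : String) (use_b : String), Dom_uses_equivalent_py use_a use_b → Spec_uses_equivalent_py use_a use_b (uses_equivalent_py use_a use_b)

-- ===== LEMMAS AND PROOFS =====
set_option maxRecDepth 8000
set_option maxHeartbeats 1000000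

-- B's lookup, as a find? over the (term, index) pairs starting at index n
def pvF (n : Int) (gs : List (PySem.Set String)) (z : String) : Option Int :=
  Option.map Prod.snd (List.find? (fun p => p.1 == z) (pvPairs n gs))

lemma pv_items : pvIdx.items = pvPairs 0 pvGroups := by rfl

lemma pv_get?_eq (z : String) : PySem.Dict.get? pvIdx z = pvF 0 pvGroups z := by
  show Option.map Prod.snd (List.find? (fun p => p.1 == z) pvIdx.items) = _
  rw [pv_items]; rfl

lemma pvF_cons (n : Int) (g : PySem.Set String) (rest : List (PySem.Set String)) (z : String) :
    pvF n (g :: rest) z = if z ∈ g then some n else pvF (n + 1) rest z := by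
  show Option.map Prod.snd (List.find? (fun p => p.1 == z)
      ((g.map fun t => (t, n)) ++ pvPairs (n + 1) rest)) = _
  rw [List.find?_append, List.find?_map]
  by_cases h : z ∈ g
  · rw [if_pos h]
    have hf : g.find? ((fun p : String × Int => p.1 == z) ∘ fun t => (t, n)) = some z := by
      rcases hf' : g.find? ((fun p : String × Int => p.1 == z) ∘ fun t => (t, n)) with _ | t
      · exact absurd (List.find?_eq_none.mp hf' z h) (by simp)
      · have ht := List.find?_some hf'
        simp only [Function.comp_apply, beq_iff_eq] at ht
        rw [ht]
    rw [hf]; rfl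
  · rw [if_neg h]
    have hf : g.find? ((fun p : String × Int => p.1 == z) ∘ fun t => (t, n)) = none := by
      apply List.find?_eq_none.mpr
      intro t ht
      simp only [Function.comp_apply, beq_iff_eq]
      intro he; exact h (he ▸ ht)
    rw [hf]; rfl

lemma pvF_ge (n : Int) (gs : List (PySem.Set String)) (z : String) (m : Int)
    (h : pvF n gs z = some m) : n ≤ m := by
  induction gs generalizing n with
  | nil => simp [pvF, pvPairs] at h
  | cons g rest ih =>
    rw [pvF_cons] at h
    split_ifs at h with hz
    · simp only [Option.some.injEq] at h
      omega
    · have := ih (n + 1) h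
      omega
  
lemma pv_contains_false {g : PySem.Set String} {z : String} (h : z ∉ g) :
    PySem.Set.contains g z = false := by
  rw [← Bool.not_eq_true]
  intro hc
  exact h ((PySem.Set.contains_iff g z).mp hc)

lemma pvLoopA_not_mem_left (x y : String) (gs : List (PySem.Set String))
    (h : ∀ g ∈ gs, x ∉ g) : pvLoopA x y gs = false := by
  induction gs with
  | nil => rfl
  | cons g rest ih =>
    show (if PySem.Set.contains g x && PySem.Set.contains g y then true else pvLoopA x y rest) = false
    rw [pv_contains_false (h g List.mem_cons_self)]
    simp only [Bool.false_and, Bool.false_eq_true, if_false]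
    exact ih (fun g' hg' => h g' (List.mem_cons_of_mem _ hg'))

lemma pvLoopA_not_mem_right (x y : String) (gs : List (PySem.Set String))
    (h : ∀ g ∈ gs, y ∉ g) : pvLoopA x y gs = false := by
  induction gs with
  | nil => rfl
  | cons g rest ih =>
    show (if PySem.Set.contains g x && PySem.Set.contains g y then true else pvLoopA x y rest) = false
    rw [pv_contains_false (h g List.mem_cons_self)]
    simp only [Bool.and_false, Bool.false_eq_true, if_false]
    exact ih (fun g' hg' => h g' (List.mem_cons_of_mem _ hg'))

lemma pvF_ne_none_of_mem (gs : List (PySem.Set String)) (z : String) :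
    ∀ n : Int, ∀ g' ∈ gs, z ∈ g' → pvF n gs z ≠ none := by
  induction gs with
  | nil => intro n g' h; simp at h
  | cons g rest ih =>
    intro n g' hg' hz
    rw [pvF_cons]
    split_ifs with hzg
    · simp
    · rcases List.mem_cons.mp hg' with rfl | h2
      · exact absurd hz hzg
      · exact ih (n + 1) g' h2 hz

-- the heart: A's scan over the groups equals B's two indexed lookups, for any group list
-- whose flattening has no duplicate term
lemma pv_main (gs : List (PySem.Set String)) (n : Int) (x y : String)
    (h : gs.flatten.Nodup) :
    pvLoopA x y gs =
      (match pvF n gs x with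
       | none => false
       | some g => pvF n gs y == some g) := by
  induction gs generalizing n with
  | nil => rfl
  | cons g rest ih =>
    rw [List.flatten_cons, List.nodup_append] at h
    obtain ⟨hg, hrest, hdisj⟩ := h
    have hmem : ∀ z : String, z ∈ g → ∀ g' ∈ rest, z ∉ g' := by
      intro z hz g' hg' hz'
      exact hdisj z hz z (List.mem_flatten.mpr ⟨g', hg', hz'⟩) rfl
    rw [pvF_cons, pvF_cons]
    show (if PySem.Set.contains g x && PySem.Set.contains g y then true else pvLoopA x y rest) = _
    by_cases hx : x ∈ g
    · rw [if_pos hx, (PySem.Set.contains_iff g x).mpr hx, Bool.true_and]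
      by_cases hy : y ∈ g
      · rw [(PySem.Set.contains_iff g y).mpr hy, if_pos hy]
        simp
      · rw [pv_contains_false hy]
        simp only [Bool.false_eq_true, if_false]
        rw [if_neg hy]
        rw [pvLoopA_not_mem_left x y rest (hmem x hx)]
        rcases hf : pvF (n + 1) rest y with _ | m
        · rfl
        · have hgt := pvF_ge _ _ _ _ hf
          symm
          rw [beq_eq_false_iff_ne]
          intro hc
          rw [Option.some_inj] at hc
          omega
    · rw [pv_contains_false hx]
      simp only [Bool.false_and, Bool.false_eq_true, if_false]
      rw [if_neg hx]
      rcases hfx : pvF (n + 1) rest x with _ | m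
      · have hxr : ∀ g' ∈ rest, x ∉ g' := by
          intro g' hg' hx'
          exact pvF_ne_none_of_mem rest x (n + 1) g' hg' hx' hfx
        exact pvLoopA_not_mem_left x y rest hxr
      · have hm := pvF_ge _ _ _ _ hfx
        by_cases hy : y ∈ g
        · rw [if_pos hy]
          rw [pvLoopA_not_mem_right x y rest (hmem y hy)]
          symm
          rw [beq_eq_false_iff_ne]
          intro hc
          rw [Option.some_inj] at hc
          omega
        · rw [if_neg hy]
          have hrec := ih (n + 1) hrest
          rw [hfx] at hrec
          exact hrec

lemma pv_flatten_eq : pvGroups.flatten =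
    [ "1 family dwelling", "single family dwelling", "single family", "single family residential", "sfr", "one family dwelling",
      "2 family dwelling", "two family dwelling", "two family residential", "duplex", "2 family",
      "apartments", "multi-family", "multifamily",
      "office", "offices",
      "retail", "retail sales", "retail store" ] := by rfl

lemma pv_groups_nodup : pvGroups.flatten.Nodup := by
  rw [pv_flatten_eq]
  decide

-- ===== VERDICT (by name: the statement is the Claim_ definition above) =====
theorem uses_equivalent_py_spec : Claim_equal_uses_equivalent_py := by
  intro ua ub _
  unfold Spec_uses_equivalent_py uses_equivalent_py uses_equivalent_py_alt
  by_cases h : PySem.Str.strip (PySem.Str.lower ua) = PySem.Str.strip (PySem.Str.lower ub)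
  · simp [h]
  · simp only [if_neg h]
    rw [pv_get?_eq, pv_get?_eq]
    have hmain := pv_main pvGroups 0 (PySem.Str.strip (PySem.Str.lower ua)) (PySem.Str.strip (PySem.Str.lower ub)) pv_groups_nodup
    rcases hfa : pvF 0 pvGroups (PySem.Str.strip (PySem.Str.lower ua)) with _ | g
    · rw [hfa] at hmain
      rw [hmain]
    · rw [hfa] at hmain
      rw [hmain]
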